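-- pv_equiv track=rewrite | github.com/wojciechmalinowski93/hacknation-2025 | zgubione/mcod/counters/management/commands/initialize_date_counters.py | find_summary_data_gaps
-- ===== SOURCE A (Python) =====
-- def find_summary_data_gaps(sorted_entries):
--     data_gaps = []
--     gap_start = 0
--     found_gap = False
--     for entry_index, entry_details in enumerate(sorted_entries):
--         if entry_details["summary_views"] is None and not found_gap:
--             found_gap = True
--         elif entry_details["summary_views"] is not None and not found_gap:
--             gap_start = entry_index
--         elif entry_details["summary_views"] is not None and found_gap:
--             found_gap = False
--             data_gaps.append((gap_start, entry_index))
--             gap_start = entry_index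
--         if found_gap and entry_index == len(sorted_entries) - 1:
--             data_gaps.append((gap_start, entry_index))
--     return data_gaps
-- ===== SOURCE B (Python) =====
-- def find_summary_data_gaps(sorted_entries):
--     n = len(sorted_entries)
--     none_idxs = [i for i, e in enumerate(sorted_entries)
--                  if e["summary_views"] is None]
--     gaps = []
--     run_start = prev = None
--     for i in none_idxs:
--         if run_start is None:
--             run_start = prev = i
--         elif i == prev + 1:
--             prev = i
--         else:
--             gaps.append((max(run_start - 1, 0), prev + 1))
--             run_start = prev = i
--     if run_start is not None:
--         end = prev + 1 if prev < n - 1 else n - 1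
--         gaps.append((max(run_start - 1, 0), end))
--     return gaps
-- ===== Notes on version B (the rewrite author's own statement) =====
-- stated objective: alternative
-- what changed: Replaces the flag-based one-pass state machine with a collect-then-group decomposition: first list the indices whose summary_views is None, then group maximal consecutive runs and compute each gap's endpoints arithmetically from the run's endpoints.
import Mathlib
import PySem

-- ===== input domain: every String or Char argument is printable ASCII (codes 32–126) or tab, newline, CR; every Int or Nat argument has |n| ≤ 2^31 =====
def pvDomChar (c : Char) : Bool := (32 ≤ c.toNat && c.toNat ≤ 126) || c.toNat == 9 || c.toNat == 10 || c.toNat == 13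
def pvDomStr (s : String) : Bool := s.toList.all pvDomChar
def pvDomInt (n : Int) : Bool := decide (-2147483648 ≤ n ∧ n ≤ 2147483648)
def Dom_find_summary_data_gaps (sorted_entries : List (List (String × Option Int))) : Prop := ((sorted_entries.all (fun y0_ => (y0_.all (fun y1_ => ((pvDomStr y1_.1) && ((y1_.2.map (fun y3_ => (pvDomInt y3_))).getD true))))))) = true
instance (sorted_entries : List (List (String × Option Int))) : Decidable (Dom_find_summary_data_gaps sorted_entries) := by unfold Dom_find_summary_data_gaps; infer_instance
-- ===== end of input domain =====

-- B replaces A's flag-based one-pass state machine by collecting the None indices and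
-- grouping maximal consecutive runs (objective: alternative decomposition, same cost).

-- ===== PORT A =====
-- entry_details["summary_views"]: first match in the assoc list; a missing key raises
-- KeyError in Python (excluded by Pre_ below), here it yields none like a stored None.
def svLookupA (e : List (String × Option Int)) : Option Int :=
  ((e.find? (fun p => p.1 == "summary_views")).map Prod.snd).getD none

-- the for-loop over enumerate(sorted_entries): state (gap_start, found_gap, data_gaps),
-- i the current index, n the total length (for the 'entry_index == len - 1' test)
def loopA : List (List (String × Option Int)) → Nat → Nat → Int → Bool → List (Int × Int) → List (Int × Int)
  | [], _, _, _, _, acc => acc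
  | e :: rest, i, n, gs, fg, acc =>
    let x := svLookupA e
    let s :=
      if x.isNone && !fg then (gs, true, acc)
      else if !x.isNone && !fg then ((i : Int), false, acc)
      else if !x.isNone && fg then ((i : Int), false, acc ++ [(gs, (i : Int))])
      else (gs, fg, acc)
    let acc' := if s.2.1 && (i == n - 1) then s.2.2 ++ [(s.1, (i : Int))] else s.2.2
    loopA rest (i + 1) n s.1 s.2.1 acc'

def find_summary_data_gaps (sorted_entries : List (List (String × Option Int))) : List (Int × Int) :=
  loopA sorted_entries 0 sorted_entries.length 0 false []

-- ===== PORT B =====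
def svLookupB (e : List (String × Option Int)) : Option Int :=
  ((e.find? (fun p => p.1 == "summary_views")).map Prod.snd).getD none

-- [i for i, e in enumerate(sorted_entries) if e["summary_views"] is None]
def noneIdxsB : List (List (String × Option Int)) → Nat → List Int
  | [], _ => []
  | e :: rest, i =>
    if (svLookupB e).isNone then (i : Int) :: noneIdxsB rest (i + 1) else noneIdxsB rest (i + 1)

-- the for-loop over none_idxs: state (run_start, prev) (none before the first index), gaps
def runsB : List Int → Option (Int × Int) → List (Int × Int) → Option (Int × Int) × List (Int × Int)
  | [], st, gaps => (st, gaps)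
  | i :: rest, st, gaps =>
    match st with
    | none => runsB rest (some (i, i)) gaps
    | some (rs, p) =>
      if i == p + 1 then runsB rest (some (rs, i)) gaps
      else runsB rest (some (i, i)) (gaps ++ [(max (rs - 1) 0, p + 1)])

-- the trailing 'if run_start is not None: … gaps.append(…)'
def finishB (n : Int) : Option (Int × Int) × List (Int × Int) → List (Int × Int)
  | (none, gaps) => gaps
  | (some (rs, p), gaps) => gaps ++ [(max (rs - 1) 0, if p < n - 1 then p + 1 else n - 1)]

def find_summary_data_gaps_alt (sorted_entries : List (List (String × Option Int))) : List (Int × Int) :=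
  finishB (sorted_entries.length : Int) (runsB (noneIdxsB sorted_entries 0) none [])

-- ===== PRECONDITION & SPEC =====
-- Pre_ excludes exactly the inputs where Python A raises KeyError: an entry without a
-- "summary_views" key (B raises there too).
def Pre_find_summary_data_gaps (sorted_entries : List (List (String × Option Int))) : Prop :=
  ∀ e ∈ sorted_entries, "summary_views" ∈ e.map Prod.fst

instance (sorted_entries : List (List (String × Option Int))) : Decidable (Pre_find_summary_data_gaps sorted_entries) := by
  unfold Pre_find_summary_data_gaps; infer_instance

def pvWitness_find_summary_data_gaps : (List (List (String × Option Int))) :=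
  [[("summary_views", some 3)], [("summary_views", none)], [("summary_views", some 5)]]

def Spec_find_summary_data_gaps (sorted_entries : List (List (String × Option Int))) (out : List (Int × Int)) : Prop := out = find_summary_data_gaps_alt sorted_entries
instance (sorted_entries : List (List (String × Option Int))) (out : List (Int × Int)) : Decidable (Spec_find_summary_data_gaps sorted_entries out) := by unfold Spec_find_summary_data_gaps; infer_instance

-- ===== CLAIM (what is proved, stated in full; the proofs are below) =====
def Claim_equal_find_summary_data_gaps : Prop := ∀ (sorted_entries : List (List (String × Option Int))), Dom_find_summary_data_gaps sorted_entries → Pre_find_summary_data_gaps sorted_entries → Spec_find_summary_data_gaps sorted_entries (find_summary_data_gaps sorted_entries)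

-- ===== LEMMAS AND PROOFS =====

-- Reference function both ports are reduced to: recursion over the entries carrying the
-- index and, when inside a None-run, the gap's already-computed start value g.
def refG : List (List (String × Option Int)) → Nat → Option Int → List (Int × Int)
  | [], _, none => []
  | [], i, some g => [(g, (i : Int) - 1)]
  | e :: rest, i, none =>
    if (svLookupA e).isNone then refG rest (i + 1) (some (max ((i : Int) - 1) 0))
    else refG rest (i + 1) none
  | e :: rest, i, some g =>
    if (svLookupA e).isNone then refG rest (i + 1) (some g)
    else (g, (i : Int)) :: refG rest (i + 1) none

theorem loopA_eq_refG (rest : List (List (String × Option Int))) :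
    ∀ (i n : Nat) (gs : Int) (fg : Bool) (acc : List (Int × Int)),
    n = i + rest.length →
    (fg = false → gs = max ((i : Int) - 1) 0) →
    (rest = [] → fg = false) →
    loopA rest i n gs fg acc = acc ++ refG rest i (if fg then some gs else none) := by
  induction rest with
  | nil =>
    intro i n gs fg acc _ _ h0
    simp [loopA, h0 rfl, refG]
  | cons e rest ih =>
    intro i n gs fg acc hn hgs _
    have hlast : (i == n - 1) = decide (rest = []) := by
      cases rest with
      | nil => subst hn; simp
      | cons f fs => simp at hn ⊢; omega
    conv_lhs => rw [loopA]
    cases hb : (svLookupA e).isNone with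
    | true =>
      cases fg with
      | false =>
        have hgs0 : gs = max ((i : Int) - 1) 0 := hgs rfl
        cases rest with
        | nil =>
          have h1 : (i == n - 1) = true := by rw [hlast]; simp
          simp [loopA, hb, h1, refG, hgs0]
        | cons f fs =>
          have h1 : (i == n - 1) = false := by rw [hlast]; simp
          simp only [h1, Bool.not_false, Bool.and_self, Bool.and_false,
            Bool.false_eq_true, if_true, if_false]
          rw [ih (i + 1) n gs true acc (by simp at hn ⊢; omega) (by simp) (by simp)]
          simp [refG, hb, hgs0]
      | true =>
        cases rest with
        | nil =>
          have h1 : (i == n - 1) = true := by rw [hlast]; simp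
          simp [loopA, hb, h1, refG]
        | cons f fs =>
          have h1 : (i == n - 1) = false := by rw [hlast]; simp
          simp only [h1, Bool.not_true, Bool.and_false, Bool.and_true,
            Bool.false_eq_true, if_false, if_true]
          rw [ih (i + 1) n gs true acc (by simp at hn ⊢; omega) (by simp) (by simp)]
          simp [refG, hb]
    | false =>
      cases fg with
      | false =>
        simp only [Bool.not_false, Bool.false_and, Bool.and_false,
          Bool.and_self, Bool.false_eq_true, if_false, if_true]
        rw [ih (i + 1) n (i : Int) false acc (by simp at hn ⊢; omega)
          (by intro _; push_cast; omega) (by simp)]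
        simp [refG, hb]
      | true =>
        simp only [Bool.not_true, Bool.and_false, Bool.and_true, Bool.false_and,
          Bool.not_false, Bool.false_eq_true, if_false, if_true]
        rw [ih (i + 1) n (i : Int) false (acc ++ [(gs, (i : Int))]) (by simp at hn ⊢; omega)
          (by intro _; push_cast; omega) (by simp)]
        simp [refG, hb]

-- pending already-closed run / open run translation of runsB's state into refG's state
def pendSt (st : Option (Int × Int)) (i : Nat) : List (Int × Int) :=
  match st with
  | none => []
  | some (rs, p) => if p + 1 < (i : Int) then [(max (rs - 1) 0, p + 1)] else []

def openSt (st : Option (Int × Int)) (i : Nat) : Option Int :=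
  match st with
  | none => none
  | some (rs, p) => if p + 1 = (i : Int) then some (max (rs - 1) 0) else none

theorem runsB_eq_refG (rest : List (List (String × Option Int))) :
    ∀ (i : Nat) (st : Option (Int × Int)) (gaps : List (Int × Int)),
    (∀ rs p, st = some (rs, p) → p < (i : Int)) →
    finishB ((i + rest.length : Nat) : Int) (runsB (noneIdxsB rest i) st gaps) =
      gaps ++ pendSt st i ++ refG rest i (openSt st i) := by
  induction rest with
  | nil =>
    intro i st gaps hst
    match st with
    | none => simp [noneIdxsB, runsB, finishB, pendSt, openSt, refG]
    | some (rs, p) =>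
      have hp := hst rs p rfl
      simp only [noneIdxsB, runsB, finishB, pendSt, openSt, List.length_nil, Nat.add_zero]
      rcases lt_or_eq_of_le (by omega : p + 1 ≤ (i : Int)) with h | h
      · simp [h, refG, show p + 1 ≠ (i : Int) by omega]
      · simp [h, refG, show ¬ p < (i : Int) - 1 by omega]
  | cons e rest ih =>
    intro i st gaps hst
    have hlen : (i + (e :: rest).length : Nat) = ((i + 1) + rest.length : Nat) := by
      simp; omega
    cases hb : (svLookupB e).isNone with
    | true =>
      have hbA : (svLookupA e).isNone = true := hb
      simp only [noneIdxsB, hb, if_true]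
      match st with
      | none =>
        simp only [runsB]
        rw [hlen, ih (i + 1) (some ((i : Int), (i : Int))) gaps
          (by intro rs p h; injection h with h; injection h with h1 h2; push_cast; omega)]
        simp [pendSt, openSt, refG, hbA]
      | some (rs, p) =>
        have hp := hst rs p rfl
        simp only [runsB]
        rcases lt_or_eq_of_le (by omega : p + 1 ≤ (i : Int)) with h | h
        · have : ((i : Int) == p + 1) = false := by simp; omega
          simp only [this, Bool.false_eq_true, if_false]
          rw [hlen, ih (i + 1) (some ((i : Int), (i : Int))) _
            (by intro rs' p' hh; injection hh with hh; injection hh with h1 h2; push_cast; omega)]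
          simp [pendSt, openSt, refG, hbA, h, show ¬ p + 1 = (i : Int) by omega]
        · have : ((i : Int) == p + 1) = true := by simp; omega
          simp only [this, if_true]
          rw [hlen, ih (i + 1) (some (rs, (i : Int))) gaps
            (by intro rs' p' hh; injection hh with hh; injection hh with h1 h2; push_cast; omega)]
          simp [pendSt, openSt, refG, hbA, h]
    | false =>
      have hbA : (svLookupA e).isNone = false := hb
      simp only [noneIdxsB, hb, Bool.false_eq_true, if_false]
      rw [hlen, ih (i + 1) st gaps
        (by intro rs p h; have := hst rs p h; push_cast; omega)]
      match st with
      | none => simp [pendSt, openSt, refG, hbA]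
      | some (rs, p) =>
        have hp := hst rs p rfl
        rcases lt_or_eq_of_le (by omega : p + 1 ≤ (i : Int)) with h | h
        · simp [pendSt, openSt, refG, hbA, h, show p + 1 < ((i : Nat) : Int) + 1 by omega,
            show ¬ p + 1 = (i : Int) by omega, show ¬ p + 1 = (i : Int) + 1 by omega]
        · simp [pendSt, openSt, refG, hbA, h]

-- ===== VERDICT (by name: the statement is the Claim_ definition above) =====
theorem find_summary_data_gaps_spec : Claim_equal_find_summary_data_gaps := by
  intro se _ _
  unfold Spec_find_summary_data_gaps find_summary_data_gaps find_summary_data_gaps_alt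
  rw [loopA_eq_refG se 0 se.length 0 false [] (by simp) (by intro _; simp) (by simp)]
  have := runsB_eq_refG se 0 none []
  simp only [Nat.zero_add, pendSt, openSt] at this
  rw [this (by intro _ _ h; cases h)]
  simp
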